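-- pv_equiv track=rewrite | github.com/Sallyrideauto/codetree-TILs | 240809/전부 포함하는 선분/all-inclusive-segment.py | find_min_length_to_cover_all_segments
-- ===== SOURCE A (Python) =====
-- def find_min_length_to_cover_all_segments(n, segments):
--     # 전체 범위를 포함할 수 있는 선분을 찾기
--     def range_cover(segments):
--         start = min(seg[0] for seg in segments)
--         end = max(seg[1] for seg in segments)
--         return end - start
--
--     # 전체 범위를 포함할 수 있는 선분의 길이
--     min_length = range_cover(segments)
--
--     for i in range(n):
--         # 선분 i를 제거한 후 나머지 선분들로 범위를 계산
--         remaining_segments = segments[:i] + segments[i+1:]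
--         length_with_removed = range_cover(remaining_segments)
--         min_length = min(min_length, length_with_removed)
--
--     return min_length
-- ===== SOURCE B (Python) =====
-- def find_min_length_to_cover_all_segments(n, segments):
--     m = len(segments)
--     # suffix covers: suf[i] = (min start, max end) over segments[i:], built back to front
--     suf = [None] * m
--     for i in range(m - 1, -1, -1):
--         lo, hi = segments[i][0], segments[i][1]
--         if i + 1 < m:
--             lo = min(lo, suf[i + 1][0])
--             hi = max(hi, suf[i + 1][1])
--         suf[i] = (lo, hi)
--     best = suf[0][1] - suf[0][0]
--     pre = None  # (min start, max end) over segments[:i]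
--     for i in range(min(n, m)):
--         if i + 1 < m:
--             slo, shi = suf[i + 1]
--             cand = (slo, shi) if pre is None else (min(pre[0], slo), max(pre[1], shi))
--         else:
--             cand = pre
--         best = min(best, cand[1] - cand[0])
--         s = segments[i]
--         pre = (s[0], s[1]) if pre is None else (min(pre[0], s[0]), max(pre[1], s[1]))
--     return best
-- ===== Notes on version B (the rewrite author's own statement) =====
-- stated objective: faster
-- what changed: Instead of rebuilding and rescanning the whole list for every removal candidate (O(n*m)), B precomputes a suffix array of (min start, max end) covers and sweeps once with a running prefix cover, so each removal's span is O(1).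
import Mathlib
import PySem

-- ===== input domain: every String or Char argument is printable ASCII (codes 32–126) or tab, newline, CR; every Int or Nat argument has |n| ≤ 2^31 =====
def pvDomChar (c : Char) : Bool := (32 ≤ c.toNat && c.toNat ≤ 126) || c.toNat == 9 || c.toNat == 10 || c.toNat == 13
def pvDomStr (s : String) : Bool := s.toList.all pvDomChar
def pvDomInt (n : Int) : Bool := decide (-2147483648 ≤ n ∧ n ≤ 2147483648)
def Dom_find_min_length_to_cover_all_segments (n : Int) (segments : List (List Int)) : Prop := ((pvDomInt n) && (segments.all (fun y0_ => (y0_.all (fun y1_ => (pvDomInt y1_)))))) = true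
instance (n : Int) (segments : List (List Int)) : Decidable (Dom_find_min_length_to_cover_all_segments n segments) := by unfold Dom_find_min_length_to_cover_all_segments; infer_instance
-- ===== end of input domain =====

-- B precomputes suffix (min start, max end) covers and sweeps once with a running prefix cover,
-- instead of A's rebuild-and-rescan of the whole list per removal candidate (objective: faster).

-- ===== PORT A =====
-- seg[k] (in range under Pre_: every segment has length ≥ 2)
def pvGetI (s : List Int) (k : Int) : Int := PySem.List.pyGetD s k 0

-- range_cover: max(seg[1] for seg) - min(seg[0] for seg); min/max of an empty list raise in Python (excluded by Pre_)
def pvCoverA (segs : List (List Int)) : Int :=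
  ((PySem.List.max? (segs.map (fun s => pvGetI s 1)) (fun x => x)).getD 0)
  - ((PySem.List.min? (segs.map (fun s => pvGetI s 0)) (fun x => x)).getD 0)

def find_min_length_to_cover_all_segments (n : Int) (segments : List (List Int)) : Int :=
  (PySem.List.pyRange 0 n 1).foldl
    (fun min_length i =>
      let remaining := PySem.List.slice segments none (some i) ++ PySem.List.slice segments (some (i + 1)) none
      min min_length (pvCoverA remaining))
    (pvCoverA segments)

-- ===== PORT B =====
-- suffix covers, built back to front: (pvSuf segs)[i] = (min start, max end) over segs[i:]
def pvSuf : List (List Int) → List (Int × Int)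
  | [] => []
  | s :: rest =>
    match pvSuf rest with
    | [] => [(pvGetI s 0, pvGetI s 1)]
    | (lo, hi) :: t => (min (pvGetI s 0) lo, max (pvGetI s 1) hi) :: (lo, hi) :: t

-- one step of B's sweep (i+1 < m uses the suffix array; pre is the running prefix cover)
def pvStepB (segments : List (List Int)) (suf : List (Int × Int)) (m : Int)
    (st : Int × Option (Int × Int)) (i : Int) : Int × Option (Int × Int) :=
  let cand : Int × Int :=
    if i + 1 < m then
      let p := PySem.List.pyGetD suf (i + 1) (0, 0)
      match st.2 with
      | some pre => (min pre.1 p.1, max pre.2 p.2)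
      | none => p
    else
      match st.2 with
      | some pre => pre
      | none => (0, 0)  -- unreachable under Pre_ (Python raises here)
  let s := PySem.List.pyGetD segments i []
  let pre' : Option (Int × Int) :=
    match st.2 with
    | some pre => some (min pre.1 (pvGetI s 0), max pre.2 (pvGetI s 1))
    | none => some (pvGetI s 0, pvGetI s 1)
  (min st.1 (cand.2 - cand.1), pre')

def find_min_length_to_cover_all_segments_alt (n : Int) (segments : List (List Int)) : Int :=
  let m : Int := segments.length
  let suf := pvSuf segments
  let h0 := suf.getD 0 (0, 0)
  let best0 := h0.2 - h0.1
  ((PySem.List.pyRange 0 (min n m) 1).foldl (pvStepB segments suf m) (best0, none)).1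

-- ===== PRECONDITION & SPEC =====
-- Pre_ excludes exactly the inputs where A raises: an empty segment list or a removal leaving it empty
-- (ValueError from min()/max() of an empty sequence), and a segment shorter than 2 (IndexError).
def Pre_find_min_length_to_cover_all_segments (n : Int) (segments : List (List Int)) : Prop :=
  segments ≠ [] ∧ (∀ s ∈ segments, 2 ≤ s.length) ∧ (1 ≤ n → 2 ≤ segments.length)
instance (n : Int) (segments : List (List Int)) : Decidable (Pre_find_min_length_to_cover_all_segments n segments) := by unfold Pre_find_min_length_to_cover_all_segments; infer_instance
def pvWitness_find_min_length_to_cover_all_segments : Int × List (List Int) := (2, [[1, 5], [2, 9]])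

def Spec_find_min_length_to_cover_all_segments (n : Int) (segments : List (List Int)) (out : Int) : Prop := out = find_min_length_to_cover_all_segments_alt n segments
instance (n : Int) (segments : List (List Int)) (out : Int) : Decidable (Spec_find_min_length_to_cover_all_segments n segments out) := by unfold Spec_find_min_length_to_cover_all_segments; infer_instance

-- ===== CLAIM (what is proved, stated in full; the proofs are below) =====
def Claim_equal_find_min_length_to_cover_all_segments : Prop := ∀ (n : Int) (segments : List (List Int)), Dom_find_min_length_to_cover_all_segments n segments → Pre_find_min_length_to_cover_all_segments n segments → Spec_find_min_length_to_cover_all_segments n segments (find_min_length_to_cover_all_segments n segments)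

-- ===== LEMMAS AND PROOFS =====

-- min start / max end over a list of segments (0 for the empty list, matching the ports' defaults)
def pvLows : List (List Int) → Int
  | [] => 0
  | s :: t => (t.map (fun s => pvGetI s 0)).foldl min (pvGetI s 0)
def pvHighs : List (List Int) → Int
  | [] => 0
  | s :: t => (t.map (fun s => pvGetI s 1)).foldl max (pvGetI s 1)

theorem foldl_min_comm (t : List Int) : ∀ x a : Int, t.foldl min (min x a) = min x (t.foldl min a) := by
  induction t with
  | nil => intro x a; rfl
  | cons b t ih =>
    intro x a
    show t.foldl min (min (min x a) b) = _
    rw [min_assoc, ih]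
    rfl

theorem foldl_max_comm (t : List Int) : ∀ x a : Int, t.foldl max (max x a) = max x (t.foldl max a) := by
  induction t with
  | nil => intro x a; rfl
  | cons b t ih =>
    intro x a
    show t.foldl max (max (max x a) b) = _
    rw [max_assoc, ih]
    rfl

theorem pvLows_cons (s : List Int) (l : List (List Int)) (h : l ≠ []) :
    pvLows (s :: l) = min (pvGetI s 0) (pvLows l) := by
  match l with
  | [] => exact absurd rfl h
  | a :: t =>
    show (t.map _).foldl min (min (pvGetI s 0) (pvGetI a 0)) = _
    rw [foldl_min_comm]
    rfl

theorem pvHighs_cons (s : List Int) (l : List (List Int)) (h : l ≠ []) :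
    pvHighs (s :: l) = max (pvGetI s 1) (pvHighs l) := by
  match l with
  | [] => exact absurd rfl h
  | a :: t =>
    show (t.map _).foldl max (max (pvGetI s 1) (pvGetI a 1)) = _
    rw [foldl_max_comm]
    rfl

theorem pvLows_append (u v : List (List Int)) (hu : u ≠ []) (hv : v ≠ []) :
    pvLows (u ++ v) = min (pvLows u) (pvLows v) := by
  induction u with
  | nil => exact absurd rfl hu
  | cons s u ih =>
    match u with
    | [] =>
      simpa using pvLows_cons s v hv
    | b :: u' =>
      rw [List.cons_append, pvLows_cons s ((b :: u') ++ v) (by simp),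
        ih (by simp), pvLows_cons s (b :: u') (by simp), min_assoc]

theorem pvHighs_append (u v : List (List Int)) (hu : u ≠ []) (hv : v ≠ []) :
    pvHighs (u ++ v) = max (pvHighs u) (pvHighs v) := by
  induction u with
  | nil => exact absurd rfl hu
  | cons s u ih =>
    match u with
    | [] =>
      simpa using pvHighs_cons s v hv
    | b :: u' =>
      rw [List.cons_append, pvHighs_cons s ((b :: u') ++ v) (by simp),
        ih (by simp), pvHighs_cons s (b :: u') (by simp), max_assoc]

theorem pvCoverA_eq (segs : List (List Int)) :
    pvCoverA segs = pvHighs segs - pvLows segs := by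
  match segs with
  | [] => rfl
  | s :: t =>
    unfold pvCoverA
    rw [List.map_cons, List.map_cons, PySem.List.max?_id_cons, PySem.List.min?_id_cons]
    simp [pvLows, pvHighs, List.foldl_map]

theorem pvSuf_eq (segs : List (List Int)) :
    pvSuf segs = (List.range segs.length).map (fun j => (pvLows (segs.drop j), pvHighs (segs.drop j))) := by
  induction segs with
  | nil => rfl
  | cons s rest ih =>
    have hrhs : (List.range (s :: rest).length).map (fun j => (pvLows ((s :: rest).drop j), pvHighs ((s :: rest).drop j)))
        = (pvLows (s :: rest), pvHighs (s :: rest)) :: (List.range rest.length).map (fun j => (pvLows (rest.drop j), pvHighs (rest.drop j))) := by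
      rw [List.length_cons, List.range_succ_eq_map, List.map_cons, List.map_map]
      rfl
    rw [hrhs, ← ih]
    show (match pvSuf rest with
      | [] => [(pvGetI s 0, pvGetI s 1)]
      | (lo, hi) :: t => (min (pvGetI s 0) lo, max (pvGetI s 1) hi) :: (lo, hi) :: t)
      = (pvLows (s :: rest), pvHighs (s :: rest)) :: pvSuf rest
    match rest, ih with
    | [], _ => simp [pvSuf, pvLows, pvHighs]
    | r :: rest', ih =>
      have hlen : (r :: rest').length = rest'.length + 1 := rfl
      rw [ih, hlen, List.range_succ_eq_map, List.map_cons]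
      simp only [List.drop_zero]
      rw [pvLows_cons s (r :: rest') (by simp), pvHighs_cons s (r :: rest') (by simp)]

theorem pvSuf_get? (segs : List (List Int)) (j : Nat) (hj : j < segs.length) :
    (pvSuf segs)[j]? = some (pvLows (segs.drop j), pvHighs (segs.drop j)) := by
  rw [pvSuf_eq, List.getElem?_map, List.getElem?_range hj]
  rfl

-- A's fold body, named
def pvFA (segments : List (List Int)) : Int → Int → Int :=
  fun min_length i =>
    let remaining := PySem.List.slice segments none (some i) ++ PySem.List.slice segments (some (i + 1)) none
    min min_length (pvCoverA remaining)

theorem find_min_eq_fold (n : Int) (segments : List (List Int)) :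
    find_min_length_to_cover_all_segments n segments
      = (PySem.List.pyRange 0 n 1).foldl (pvFA segments) (pvCoverA segments) := rfl

-- B's running prefix cover after i iterations
def pvPreOf (segs : List (List Int)) : Nat → Option (Int × Int)
  | 0 => none
  | i + 1 => some (pvLows (segs.take (i + 1)), pvHighs (segs.take (i + 1)))

theorem take_ne_nil (segs : List (List Int)) (i : Nat) (h0 : 0 < i) (h : i ≤ segs.length) :
    segs.take i ≠ [] := by
  intro hx
  rcases List.take_eq_nil_iff.mp hx with h' | h'
  · omega
  · rw [h'] at h; simp at h; omega

theorem drop_ne_nil (segs : List (List Int)) (i : Nat) (h : i < segs.length) :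
    segs.drop i ≠ [] := by
  intro hx
  have := congrArg List.length hx
  simp at this
  omega

-- A's fold body at a natural index, in terms of take/drop extrema
theorem pvFA_nat (segs : List (List Int)) (i : Nat) (best : Int) :
    pvFA segs best (i : Int)
      = min best (pvHighs (segs.take i ++ segs.drop (i + 1)) - pvLows (segs.take i ++ segs.drop (i + 1))) := by
  have h1 : PySem.List.slice segs none (some (i : Int)) = segs.take i :=
    PySem.List.slice_to_natCast segs i
  have h2 : PySem.List.slice segs (some ((i : Int) + 1)) none = segs.drop (i + 1) := by
    have hc : (i : Int) + 1 = ((i + 1 : Nat) : Int) := by push_cast; ring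
    rw [hc]
    exact PySem.List.slice_from_natCast segs (i + 1)
  unfold pvFA
  rw [h1, h2]
  show min best (pvCoverA (segs.take i ++ segs.drop (i + 1))) = _
  rw [pvCoverA_eq]

-- one step of B equals one step of A, plus the prefix-cover update
theorem step_eq (segs : List (List Int)) (i : Nat) (hi : i < segs.length) (best : Int) :
    pvStepB segs (pvSuf segs) (segs.length : Int) (best, pvPreOf segs i) (i : Int)
      = (pvFA segs best (i : Int), pvPreOf segs (i + 1)) := by
  have hgetseg : PySem.List.pyGetD segs (i : Int) [] = segs[i] := by
    rw [PySem.List.pyGetD_natCast, List.getD_eq_getElem?_getD, List.getElem?_eq_getElem hi]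
    rfl
  have htake1 : segs.take (i + 1) = segs.take i ++ [segs[i]] := by
    rw [List.take_add_one, List.getElem?_eq_getElem hi]
    rfl
  rw [pvFA_nat segs i best]
  by_cases hlt : (i : Int) + 1 < (segs.length : Int)
  · have hlt' : i + 1 < segs.length := by exact_mod_cast hlt
    have hsuf : PySem.List.pyGetD (pvSuf segs) ((i : Int) + 1) (0, 0)
        = (pvLows (segs.drop (i + 1)), pvHighs (segs.drop (i + 1))) := by
      have hc : (i : Int) + 1 = ((i + 1 : Nat) : Int) := by push_cast; ring
      rw [hc, PySem.List.pyGetD_natCast, List.getD_eq_getElem?_getD,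
          pvSuf_get? segs (i + 1) hlt']
      rfl
    match i, hi, hlt' with
    | 0, hi, hlt' =>
      simp only [pvStepB, pvPreOf, if_pos hlt, hsuf, hgetseg, htake1]
      simp [pvLows, pvHighs]
    | i + 1, hi, hlt' =>
      simp only [pvStepB, pvPreOf, if_pos hlt, hsuf, hgetseg, htake1]
      rw [pvLows_append _ _ (take_ne_nil segs (i+1) (by omega) (by omega)) (drop_ne_nil segs (i+2) (by omega)),
          pvHighs_append _ _ (take_ne_nil segs (i+1) (by omega) (by omega)) (drop_ne_nil segs (i+2) (by omega)),
          pvLows_append _ _ (take_ne_nil segs (i+1) (by omega) (by omega)) (by simp),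
          pvHighs_append _ _ (take_ne_nil segs (i+1) (by omega) (by omega)) (by simp)]
      simp [pvLows, pvHighs]
  · have hlast : i + 1 = segs.length := by
      have : ¬ (i + 1 < segs.length) := by intro h; exact hlt (by exact_mod_cast h)
      omega
    have hdrop : segs.drop (i + 1) = [] := by simp [hlast]
    match i, hi, hlast with
    | 0, hi, hlast =>
      simp only [pvStepB, pvPreOf, if_neg hlt, hgetseg, htake1, hdrop]
      simp [pvLows, pvHighs]
    | i + 1, hi, hlast =>
      simp only [pvStepB, pvPreOf, if_neg hlt, hgetseg, htake1, hdrop]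
      rw [List.append_nil,
          pvLows_append _ _ (take_ne_nil segs (i+1) (by omega) (by omega)) (by simp),
          pvHighs_append _ _ (take_ne_nil segs (i+1) (by omega) (by omega)) (by simp)]
      simp [pvLows, pvHighs]

theorem loop_eq (segs : List (List Int)) :
    ∀ (c : Nat), ∀ (i : Nat) (best : Int), i + c ≤ segs.length →
    ((PySem.List.pyRange (i : Int) ((i : Int) + (c : Int)) 1).foldl
        (pvStepB segs (pvSuf segs) (segs.length : Int)) (best, pvPreOf segs i)).1
      = (PySem.List.pyRange (i : Int) ((i : Int) + (c : Int)) 1).foldl (pvFA segs) best := by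
  intro c
  induction c with
  | zero => intro i best h; simp [PySem.List.pyRange_one_eq_nil]
  | succ c ih =>
    intro i best h
    rw [PySem.List.pyRange_one_cons (by push_cast; omega)]
    rw [List.foldl_cons, List.foldl_cons]
    rw [step_eq segs i (by omega) best]
    have hc : (i : Int) + 1 = ((i + 1 : Nat) : Int) := by push_cast; ring
    have hb : (i : Int) + ((c : Nat) + 1 : Nat) = ((i + 1 : Nat) : Int) + (c : Int) := by push_cast; ring
    rw [hb, hc]
    exact ih (i + 1) (pvFA segs best (i : Int)) (by omega)

theorem fold_fA_le (segs : List (List Int)) (l : List Int) :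
    ∀ best : Int, l.foldl (pvFA segs) best ≤ best := by
  induction l with
  | nil => intro best; simp
  | cons x l ih =>
    intro best
    calc l.foldl (pvFA segs) (pvFA segs best x) ≤ pvFA segs best x := ih _
    _ ≤ best := min_le_left _ _

theorem tail_eq (segs : List (List Int)) (l : List Int)
    (hl : ∀ x ∈ l, (segs.length : Int) ≤ x) :
    ∀ best : Int, best ≤ pvCoverA segs → l.foldl (pvFA segs) best = best := by
  induction l with
  | nil => intro best _; rfl
  | cons x l ih =>
    intro best hb
    have hx : (segs.length : Int) ≤ x := hl x (by simp)
    have h0x : 0 ≤ x := le_trans (by positivity) hx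
    obtain ⟨k, rfl⟩ : ∃ k : Nat, x = (k : Int) := ⟨x.toNat, (Int.toNat_of_nonneg h0x).symm⟩
    have hk : segs.length ≤ k := by exact_mod_cast hx
    have hstep : pvFA segs best (k : Int) = best := by
      rw [pvFA_nat segs k best, List.take_of_length_le hk,
          List.drop_eq_nil_iff.mpr (by omega), List.append_nil, ← pvCoverA_eq]
      exact min_eq_left hb
    rw [List.foldl_cons, hstep]
    exact ih (fun y hy => hl y (by simp [hy])) best hb

theorem best0_eq (segs : List (List Int)) (h : segs ≠ []) :
    ((pvSuf segs).getD 0 (0, 0)).2 - ((pvSuf segs).getD 0 (0, 0)).1 = pvCoverA segs := by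
  have h0 : 0 < segs.length := List.length_pos_of_ne_nil h
  rw [List.getD_eq_getElem?_getD, pvSuf_get? segs 0 h0]
  simp [pvCoverA_eq]

-- ===== VERDICT (by name: the statement is the Claim_ definition above) =====
theorem find_min_length_to_cover_all_segments_spec : Claim_equal_find_min_length_to_cover_all_segments := by
  intro n segs _ hpre
  obtain ⟨hne, _, hlen⟩ := hpre
  show find_min_length_to_cover_all_segments n segs = find_min_length_to_cover_all_segments_alt n segs
  rw [find_min_eq_fold]
  unfold find_min_length_to_cover_all_segments_alt
  simp only []
  rw [best0_eq segs hne]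
  by_cases hn : n ≤ 0
  · rw [PySem.List.pyRange_one_eq_nil hn,
        PySem.List.pyRange_one_eq_nil (by
          have : (0:Int) ≤ segs.length := by positivity
          omega)]
    rfl
  · rw [Int.not_le] at hn
    by_cases hnm : n ≤ (segs.length : Int)
    · have hmin : min n (segs.length : Int) = n := min_eq_left hnm
      rw [hmin]
      have hc := loop_eq segs n.toNat 0 (pvCoverA segs) (by omega)
      simp only [Nat.cast_zero, zero_add, Int.toNat_of_nonneg (by omega : (0:Int) ≤ n)] at hc
      exact hc.symm
    · rw [Int.not_le] at hnm
      have hmin : min n (segs.length : Int) = (segs.length : Int) := min_eq_right (le_of_lt hnm)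
      rw [hmin]
      have hsplit : PySem.List.pyRange 0 n 1
          = PySem.List.pyRange 0 (segs.length : Int) 1 ++ PySem.List.pyRange (segs.length : Int) n 1 :=
        PySem.List.pyRange_one_append 0 (segs.length : Int) n (by positivity) (le_of_lt hnm)
      rw [hsplit, List.foldl_append]
      rw [tail_eq segs _ (fun x hx => (PySem.List.mem_pyRange_one.mp hx).1) _
            (fold_fA_le segs _ _)]
      have hc := loop_eq segs segs.length 0 (pvCoverA segs) (by omega)
      simp only [Nat.cast_zero, zero_add] at hc
      exact hc.symm
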